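-- pv_equiv track=rewrite | github.com/PeterBeattie19/HackerRank | Data Structures/Graphs/Find_the_nearest_clone.py | bfs
-- ===== SOURCE A (Python) =====
-- def bfs(s, c, cur, graph, visited, colours, len_path):
--     if colours[c] == colours[cur] and s != cur:
--         return len_path
--     visited.add(cur)
--     for i in graph[cur]:
--         if i not in visited:
--             return bfs(s, c, i, graph, visited, colours, len_path+1)
--     return -1
-- ===== SOURCE B (Python) =====
-- def bfs(s, c, cur, graph, visited, colours, len_path):
--     # iterative rewrite of the recursive walk; same mutation of the shared visited set,
--     # same lookups in the same order (so it raises KeyError exactly where A does)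
--     target = colours[c]
--     steps = 0
--     while True:
--         if target == colours[cur] and cur != s:
--             return len_path + steps
--         visited.add(cur)
--         nxt = next((i for i in graph[cur] if i not in visited), None)
--         if nxt is None:
--             return -1
--         cur = nxt
--         steps += 1
-- ===== Notes on version B (the rewrite author's own statement) =====
-- stated objective: alternative
-- what changed: The tail recursion (threading len_path and re-reading colours[c] every level, with an explicit for/return scan of the neighbours) is replaced by an iterative while-True loop over a local cur and a step counter, with the target colour colours[c] looked up once and the first unvisited neighbour picked by next() over a generator; B performs the same walk, so it returns and raises exactly where A does.
-- outside the precondition, e.g. on bfs(0, 0, 0, {0: [1, 2], 1: []}, set(), {0: 5, 1: 7}, 0): A returns -1, B returns -1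
import Mathlib
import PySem

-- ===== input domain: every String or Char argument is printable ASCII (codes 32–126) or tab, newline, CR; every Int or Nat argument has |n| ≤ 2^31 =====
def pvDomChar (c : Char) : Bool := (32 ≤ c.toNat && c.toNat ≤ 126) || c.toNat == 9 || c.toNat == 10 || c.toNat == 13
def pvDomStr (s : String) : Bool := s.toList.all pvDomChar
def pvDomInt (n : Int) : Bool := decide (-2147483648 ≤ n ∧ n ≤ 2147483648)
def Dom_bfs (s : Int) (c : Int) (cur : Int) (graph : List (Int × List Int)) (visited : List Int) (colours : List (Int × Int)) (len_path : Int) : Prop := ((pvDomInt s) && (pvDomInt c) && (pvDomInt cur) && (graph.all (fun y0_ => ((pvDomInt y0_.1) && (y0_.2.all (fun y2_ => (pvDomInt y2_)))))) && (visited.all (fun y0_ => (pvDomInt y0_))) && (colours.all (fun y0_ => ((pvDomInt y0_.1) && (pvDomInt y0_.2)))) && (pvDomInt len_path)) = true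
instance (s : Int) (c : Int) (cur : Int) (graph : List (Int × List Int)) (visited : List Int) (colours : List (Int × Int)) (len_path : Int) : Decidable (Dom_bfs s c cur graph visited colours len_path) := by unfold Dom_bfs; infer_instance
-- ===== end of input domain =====

-- B replaces A's tail recursion by an iterative walk (hoisted target colour, step counter,
-- first-unvisited neighbour via find?); return values proved equal; both mutate the Python
-- `visited` set identically (equivalence here is about the return value).


-- ===== PORT A =====
-- fuel guard making the recursion total; each recursive step adds a fresh neighbour to
-- `visited`, so the Python recursion depth is at most (total neighbour count) + 1 and this
-- fuel is never exhausted on inputs where the Python returns.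
def pvFuel (graph : List (Int × List Int)) : Nat :=
  (graph.foldl (fun a p => a + p.2.length) 0) + 2

mutual
-- literal transliteration of A's recursion; `-2` marks inputs where the Python raises
-- (KeyError on colours/graph), which Pre_bfs excludes.
def bfsGo (fuel : Nat) (s : Int) (c : Int) (cur : Int) (graph : List (Int × List Int)) (visited : PySem.Set Int) (colours : List (Int × Int)) (len_path : Int) : Int :=
  match fuel with
  | 0 => -1
  | Nat.succ fuel =>
    match PySem.Dict.get? (PySem.Dict.mk colours) c, PySem.Dict.get? (PySem.Dict.mk colours) cur with
    | some cc, some ccur =>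
      if cc == ccur && s != cur then len_path
      else
        match PySem.Dict.get? (PySem.Dict.mk graph) cur with
        | none => -2
        | some ns => bfsFor fuel s c graph (PySem.Set.add visited cur) colours len_path ns
    | _, _ => -2
  termination_by (fuel, 0)

-- A's `for i in graph[cur]: if i not in visited: return bfs(...)` loop, step for step
def bfsFor (fuel : Nat) (s : Int) (c : Int) (graph : List (Int × List Int)) (visited : PySem.Set Int) (colours : List (Int × Int)) (len_path : Int) (ns : List Int) : Int :=
  match ns with
  | [] => -1
  | i :: rest =>
    if PySem.Set.contains visited i then bfsFor fuel s c graph visited colours len_path rest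
    else bfsGo fuel s c i graph visited colours (len_path + 1)
  termination_by (fuel, ns.length + 1)
end

def bfs (s : Int) (c : Int) (cur : Int) (graph : List (Int × List Int)) (visited : List Int) (colours : List (Int × Int)) (len_path : Int) : Int :=
  bfsGo (pvFuel graph) s c cur graph visited colours len_path

-- ===== PORT B =====
-- transliteration of Source B's while-True loop: local cur, step counter, hoisted target colour
def bfsAltGo (fuel : Nat) (s : Int) (c : Int) (target : Int) (cur : Int) (graph : List (Int × List Int)) (visited : PySem.Set Int) (colours : List (Int × Int)) (base : Int) (steps : Int) : Int :=
  match fuel with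
  | 0 => -1
  | Nat.succ fuel =>
    match PySem.Dict.get? (PySem.Dict.mk colours) cur with
    | none => -2
    | some ccur =>
      if target == ccur && cur != s then base + steps
      else
        let visited' := PySem.Set.add visited cur
        match PySem.Dict.get? (PySem.Dict.mk graph) cur with
        | none => -2
        | some ns =>
          match ns.find? (fun i => !(PySem.Set.contains visited' i)) with
          | none => -1
          | some i => bfsAltGo fuel s c target i graph visited' colours base (steps + 1)

def bfs_alt (s : Int) (c : Int) (cur : Int) (graph : List (Int × List Int)) (visited : List Int) (colours : List (Int × Int)) (len_path : Int) : Int :=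
  match PySem.Dict.get? (PySem.Dict.mk colours) c with
  | none => -2
  | some target => bfsAltGo (pvFuel graph) s c target cur graph visited colours len_path 0

-- ===== PRECONDITION & SPEC =====
-- Nodes reachable from `cur` through edges whose targets avoid the initial `visited`
-- set, where expansion stops at a node whose colour matches colours[c] (the walk returns
-- there): a plain graph-reachability closure, not a run of either port (it ignores the
-- first-neighbour rule and the walk's own growing visited set).  Every node the Python
-- walk visits lies in this set.
def pvMatch (s : Int) (c : Int) (colours : List (Int × Int)) (x : Int) : Bool :=
  (PySem.Dict.get? (PySem.Dict.mk colours) x == PySem.Dict.get? (PySem.Dict.mk colours) c) && (x != s)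

def pvReachStep (s : Int) (c : Int) (graph : List (Int × List Int)) (visited : List Int) (colours : List (Int × Int)) (r : List Int) : List Int :=
  (r ++ ((graph.filter (fun p => decide (p.1 ∈ r) && !pvMatch s c colours p.1)).flatMap Prod.snd).filter
          (fun x => decide (x ∉ visited) && decide (x ∉ r))).dedup

def pvReach : Nat → Int → Int → List (Int × List Int) → List Int → List (Int × Int) → List Int → List Int
  | 0, _, _, _, _, _, r => r
  | Nat.succ n, s, c, graph, visited, colours, r => pvReach n s c graph visited colours (pvReachStep s c graph visited colours r)

-- Pre_bfs excludes exactly the kind of input on which the Python A (and B identically)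
-- raises KeyError — the walk meeting a node missing from `colours` or `graph` — by
-- requiring a colour entry for c and for every reachable node, and an adjacency entry for
-- every reachable node the walk would not return at; this conservative closure also drops
-- some inputs where the walk happens to stop before an uncovered reachable node and A
-- returns normally (see the cite); B returns the identical value there.
def Pre_bfs (s : Int) (c : Int) (cur : Int) (graph : List (Int × List Int)) (visited : List Int) (colours : List (Int × Int)) (len_path : Int) : Prop :=
  c ∈ colours.map Prod.fst ∧
  ∀ x ∈ pvReach (graph.length + (graph.flatMap Prod.snd).length + 1) s c graph visited colours [cur],
    x ∈ colours.map Prod.fst ∧ (pvMatch s c colours x = false → x ∈ graph.map Prod.fst)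
instance (s : Int) (c : Int) (cur : Int) (graph : List (Int × List Int)) (visited : List Int) (colours : List (Int × Int)) (len_path : Int) : Decidable (Pre_bfs s c cur graph visited colours len_path) := by unfold Pre_bfs; infer_instance

def pvWitness_bfs : Int × Int × Int × (List (Int × List Int)) × List Int × (List (Int × Int)) × Int :=
  (0, 0, 0, [(0, [1]), (1, [])], [], [(0, 5), (1, 6)], 0)

def Spec_bfs (s : Int) (c : Int) (cur : Int) (graph : List (Int × List Int)) (visited : List Int) (colours : List (Int × Int)) (len_path : Int) (out : Int) : Prop := out = bfs_alt s c cur graph visited colours len_path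
instance (s : Int) (c : Int) (cur : Int) (graph : List (Int × List Int)) (visited : List Int) (colours : List (Int × Int)) (len_path : Int) (out : Int) : Decidable (Spec_bfs s c cur graph visited colours len_path out) := by unfold Spec_bfs; infer_instance

-- ===== CLAIM (what is proved, stated in full; the proofs are below) =====
def Claim_equal_bfs : Prop := ∀ (s : Int) (c : Int) (cur : Int) (graph : List (Int × List Int)) (visited : List Int) (colours : List (Int × Int)) (len_path : Int), Dom_bfs s c cur graph visited colours len_path → Pre_bfs s c cur graph visited colours len_path → Spec_bfs s c cur graph visited colours len_path (bfs s c cur graph visited colours len_path)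

-- ===== LEMMAS AND PROOFS =====

-- A's neighbour for-loop computes: find the first unvisited neighbour, then recurse (or -1)
theorem bfsFor_eq_find (fuel : Nat) (s c : Int) (graph : List (Int × List Int)) (visited : PySem.Set Int) (colours : List (Int × Int)) (len_path : Int) (ns : List Int) :
    bfsFor fuel s c graph visited colours len_path ns =
      match ns.find? (fun i => !(PySem.Set.contains visited i)) with
      | none => -1
      | some i => bfsGo fuel s c i graph visited colours (len_path + 1) := by
  induction ns with
  | nil => simp [bfsFor]
  | cons i rest ih =>
    rw [bfsFor, List.find?]
    by_cases h : i ∈ visited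
    · simp [PySem.Set.contains, h, ih]
    · simp [PySem.Set.contains, h]

-- main loop equivalence: A's threaded len_path equals B's base + step counter
theorem go_eq_altGo (s c target : Int) (graph : List (Int × List Int)) (colours : List (Int × Int))
    (hC : PySem.Dict.get? (PySem.Dict.mk colours) c = some target) :
    ∀ (fuel : Nat) (cur : Int) (visited : PySem.Set Int) (base steps : Int),
      bfsGo fuel s c cur graph visited colours (base + steps) =
        bfsAltGo fuel s c target cur graph visited colours base steps := by
  intro fuel
  induction fuel with
  | zero => intro cur visited base steps; simp [bfsGo, bfsAltGo]
  | succ fuel ih =>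
    intro cur visited base steps
    rw [bfsGo, bfsAltGo, hC]
    cases hcur : PySem.Dict.get? (PySem.Dict.mk colours) cur with
    | none => simp
    | some ccur =>
      simp only []
      have hne : (s != cur) = (cur != s) := by simp [bne]; exact ⟨fun h => h.symm, fun h => h.symm⟩
      rw [hne]
      split_ifs with hcond
      · rfl
      · cases hg : PySem.Dict.get? (PySem.Dict.mk graph) cur with
        | none => simp
        | some ns =>
          simp only []
          rw [bfsFor_eq_find]
          cases hf : ns.find? (fun i => !(PySem.Set.contains (PySem.Set.add visited cur) i)) with
          | none => simp
          | some i =>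
            simp only []
            rw [show base + steps + 1 = base + (steps + 1) by ring]
            exact ih i (PySem.Set.add visited cur) base (steps + 1)

-- ===== VERDICT (by name: the statement is the Claim_ definition above) =====
theorem bfs_spec : Claim_equal_bfs := by
  intro s c cur graph visited colours len_path _ _
  unfold Spec_bfs bfs bfs_alt
  cases hC : PySem.Dict.get? (PySem.Dict.mk colours) c with
  | none =>
    obtain ⟨f, hf⟩ : ∃ f, pvFuel graph = f + 1 := ⟨_, rfl⟩
    cases hg : PySem.Dict.get? (PySem.Dict.mk graph) cur <;>
      cases hcur : PySem.Dict.get? (PySem.Dict.mk colours) cur <;>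
      simp [hf, bfsGo, hC, hcur]
  | some target =>
    have h := go_eq_altGo s c target graph colours hC (pvFuel graph) cur visited len_path 0
    cases hg : PySem.Dict.get? (PySem.Dict.mk graph) cur <;>
      cases hcur : PySem.Dict.get? (PySem.Dict.mk colours) cur <;>
      simpa using h
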